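-- pv_equiv track=rewrite | github.com/JoSQUANTUM/pygrnd | pygrnd/optimize/sat_ucp.py | setB
-- ===== SOURCE A (Python) =====
-- def createValidRuns(mini, n):
--     res=[]
--     for i in range(n-mini+1):
--         buffer=[]
--         for j in range(mini):
--             buffer.append(i+j+1)
--         res.append(buffer)
--     return res
--
-- def setB(mini,n):
--     possible=createValidRuns(mini,n)
--     res=[]
--     for i in range(1,n+1):
--         buffer=[-i]
--         for j in range(len(possible)):
--             if i in possible[j]:
--                 buffer.append((n+j+1))
--         res.append(buffer)
--     return res
-- ===== SOURCE B (Python) =====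
-- def setB(mini, n):
--     return [[-i] + [n + j + 1 for j in range(max(0, i - mini), min(n - mini, i - 1) + 1)]
--             for i in range(1, n + 1)]
-- ===== Notes on version B (the rewrite author's own statement) =====
-- stated objective: alternative
-- what changed: B computes each clause's valid run-index range in closed form (max(0,i-mini)..min(n-mini,i-1)) instead of building the list of all runs and scanning each run for membership of i.
import Mathlib
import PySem

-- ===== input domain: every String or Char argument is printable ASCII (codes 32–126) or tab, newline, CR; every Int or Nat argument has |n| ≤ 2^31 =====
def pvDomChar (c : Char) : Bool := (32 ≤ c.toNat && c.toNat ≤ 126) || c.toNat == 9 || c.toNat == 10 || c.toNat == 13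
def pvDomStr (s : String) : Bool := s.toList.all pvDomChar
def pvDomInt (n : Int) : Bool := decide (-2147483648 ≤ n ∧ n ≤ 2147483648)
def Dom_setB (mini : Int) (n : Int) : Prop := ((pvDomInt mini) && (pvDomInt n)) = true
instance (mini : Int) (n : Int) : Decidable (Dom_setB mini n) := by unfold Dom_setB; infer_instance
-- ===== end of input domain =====

-- B computes each clause's consecutive j-range directly (max/min bounds) instead of
-- building all runs and scanning each one for membership; objective: alternative.

-- ===== PORT A =====
def createValidRuns (mini : Int) (n : Int) : List (List Int) :=
  (PySem.List.pyRange 0 (n - mini + 1) 1).foldl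
    (fun res i =>
      res ++ [(PySem.List.pyRange 0 mini 1).foldl (fun buffer j => buffer ++ [i + j + 1]) []])
    []

def setB (mini : Int) (n : Int) : List (List Int) :=
  let possible := createValidRuns mini n
  -- 'for j in range(len(possible)): if i in possible[j]: …' ported as the identical
  -- index/element pairs (list indexing itself would be linear-time in Lean)
  (PySem.List.pyRange 1 (n + 1) 1).foldl
    (fun res i =>
      res ++ [((PySem.List.pyRange 0 (possible.length : Int) 1).zip possible).foldl
        (fun buffer je =>
          if i ∈ je.2 then buffer ++ [n + je.1 + 1] else buffer)
        [-i]])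
    []

-- ===== PORT B =====
def setB_alt (mini : Int) (n : Int) : List (List Int) :=
  (PySem.List.pyRange 1 (n + 1) 1).map (fun i =>
    [-i] ++ (PySem.List.pyRange (max 0 (i - mini)) (min (n - mini) (i - 1) + 1) 1).map
      (fun j => n + j + 1))

-- ===== PRECONDITION & SPEC =====
def Spec_setB (mini : Int) (n : Int) (out : List (List Int)) : Prop := out = setB_alt mini n
instance (mini : Int) (n : Int) (out : List (List Int)) : Decidable (Spec_setB mini n out) := by unfold Spec_setB; infer_instance

-- ===== CLAIM (what is proved, stated in full; the proofs are below) =====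
def Claim_equal_setB : Prop := ∀ (mini : Int) (n : Int), Dom_setB mini n → Spec_setB mini n (setB mini n)

-- ===== LEMMAS AND PROOFS =====

-- A's run list, written as a map.
lemma createValidRuns_eq_map (mini n : Int) :
    createValidRuns mini n =
      (PySem.List.pyRange 0 (n - mini + 1) 1).map
        (fun i => (PySem.List.pyRange 0 mini 1).map (fun j => i + j + 1)) := by
  unfold createValidRuns
  rw [PySem.List.foldl_append_singleton_eq_map]
  simp only [List.nil_append]
  apply List.map_congr_left
  intro i _
  rw [PySem.List.foldl_append_singleton_eq_map]
  simp

-- membership in a run, as an interval condition on the index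
lemma mem_run_iff (mini i j : Int) :
    (i ∈ (PySem.List.pyRange 0 mini 1).map (fun t => j + t + 1)) ↔
      (i - mini ≤ j ∧ j ≤ i - 1) := by
  simp only [List.mem_map, PySem.List.mem_pyRange_one]
  constructor
  · rintro ⟨t, ⟨h0, h1⟩, rfl⟩; omega
  · rintro ⟨h0, h1⟩; exact ⟨i - j - 1, by omega, by omega⟩

-- filtering an initial range by an interval condition yields the clipped range
lemma filter_interval (a b : Int) (K : Nat) :
    (PySem.List.pyRange 0 (K : Int) 1).filter (fun j => decide (a ≤ j ∧ j ≤ b)) =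
      PySem.List.pyRange (max 0 a) (min ((K : Int) - 1) b + 1) 1 := by
  induction K with
  | zero =>
      simp [PySem.List.pyRange_one_eq_nil]
  | succ K ih =>
      have h : ((K + 1 : Nat) : Int) = (K : Int) + 1 := by push_cast; ring
      rw [h, PySem.List.pyRange_one_succ_right (by positivity), List.filter_append, ih]
      by_cases hab : a ≤ (K : Int) ∧ (K : Int) ≤ b
      · have hmin1 : min ((K : Int) + 1 - 1) b = (K : Int) := by omega
        have hmin2 : min ((K : Int) - 1) b = (K : Int) - 1 := by omega
        rw [hmin1, hmin2]
        rw [PySem.List.pyRange_one_succ_right (by omega : max 0 a ≤ (K : Int))]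
        simp [hab.1, hab.2]
      · have hfilter : List.filter (fun j => decide (a ≤ j ∧ j ≤ b)) [(K : Int)] = [] := by
          simp only [List.filter]
          simp [hab]
        rw [hfilter, List.append_nil]
        by_cases hb : b ≤ (K : Int) - 1
        · have : min ((K : Int) + 1 - 1) b = min ((K : Int) - 1) b := by omega
          rw [this]
        · -- then a > K, so both ranges are empty
          have ha : (K : Int) < a := by omega
          rw [PySem.List.pyRange_one_eq_nil (by omega), PySem.List.pyRange_one_eq_nil (by omega)]

-- the inner loop of A, for one clause index i
lemma inner_eq (mini n i : Int) :
    (PySem.List.pyRange 0 ((createValidRuns mini n).length : Int) 1).foldl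
        (fun buffer j =>
          if i ∈ PySem.List.pyGetD (createValidRuns mini n) j [] then buffer ++ [n + j + 1]
          else buffer)
        [-i] =
      [-i] ++ (PySem.List.pyRange (max 0 (i - mini)) (min (n - mini) (i - 1) + 1) 1).map
        (fun j => n + j + 1) := by
  rw [createValidRuns_eq_map]
  set K : Nat := ((PySem.List.pyRange 0 (n - mini + 1) 1).map
      (fun i => (PySem.List.pyRange 0 mini 1).map (fun j => i + j + 1))).length with hK
  have hKlen : K = (n - mini + 1 - 0).toNat := by
    simp [hK, PySem.List.length_pyRange_one]
  have hcong :
      (PySem.List.pyRange 0 (K : Int) 1).foldl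
        (fun buffer j =>
          if i ∈ PySem.List.pyGetD
              ((PySem.List.pyRange 0 (n - mini + 1) 1).map
                (fun i => (PySem.List.pyRange 0 mini 1).map (fun j => i + j + 1))) j []
            then buffer ++ [n + j + 1] else buffer)
        [-i] =
      (PySem.List.pyRange 0 (K : Int) 1).foldl
        (fun buffer j =>
          if i - mini ≤ j ∧ j ≤ i - 1 then buffer ++ [n + j + 1] else buffer)
        [-i] := by
    apply PySem.List.foldl_congr_mem
    intro acc j hj
    rw [PySem.List.mem_pyRange_one] at hj
    have hjK : j < ((n - mini + 1 : Int)) := by omega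
    rw [PySem.List.pyGetD_map_pyRange_of_nonneg _ _ _ _ hj.1 hjK]
    rw [if_congr (Iff.trans (by rw [mem_run_iff]) Iff.rfl) rfl rfl]
  rw [hcong, PySem.List.foldl_append_ite, filter_interval]
  congr 1
  by_cases hnm : 0 ≤ n - mini + 1
  · have : ((K : Nat) : Int) - 1 = n - mini := by omega
    rw [this]
  · have hK0 : K = 0 := by omega
    rw [hK0]
    rw [PySem.List.pyRange_one_eq_nil (by omega), PySem.List.pyRange_one_eq_nil (by omega)]

-- zip(range(len(xs)), xs) is enumerate(xs)
lemma zip_pyRange_eq_enumerate {α : Type} (xs : List α) (s : Int) :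
    (PySem.List.pyRange s (s + (xs.length : Int)) 1).zip xs = PySem.List.enumerate xs s := by
  induction xs generalizing s with
  | nil => simp [PySem.List.enumerate_nil]
  | cons x xs ih =>
      have hlen : s + ((x :: xs).length : Int) = (s + 1) + (xs.length : Int) := by
        simp only [List.length_cons]; push_cast; ring
      rw [hlen, PySem.List.pyRange_one_cons (by omega : s < (s + 1) + (xs.length : Int))]
      rw [List.zip_cons_cons, PySem.List.enumerate_cons, ← ih (s + 1)]

-- ===== VERDICT (by name: the statement is the Claim_ definition above) =====
theorem setB_spec : Claim_equal_setB := by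
  intro mini n _
  unfold Spec_setB setB setB_alt
  rw [PySem.List.foldl_append_singleton_eq_map]
  simp only [List.nil_append]
  apply List.map_congr_left
  intro i _
  have hz := zip_pyRange_eq_enumerate (createValidRuns mini n) 0
  rw [zero_add] at hz
  rw [hz, PySem.List.enumerate_eq_map_pyRange (xs := createValidRuns mini n) (d := []), List.foldl_map]
  exact inner_eq mini n i
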